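-- pv_equiv track=rewrite | github.com/njbrake/porchsongs | backend/app/services/chord_parser.py | _extract_chord_positions
-- ===== SOURCE A (Python) =====
-- def _extract_chord_positions(chord_line: str) -> list[tuple[int, str]]:
--     """Extract (position, chord_name) pairs from a chord line."""
--     positions = []
--     i = 0
--     while i < len(chord_line):
--         if chord_line[i] != " ":
--             j = i
--             while j < len(chord_line) and chord_line[j] != " ":
--                 j += 1
--             positions.append((i, chord_line[i:j]))
--             i = j
--         else:
--             i += 1
--     return positions
-- ===== SOURCE B (Python) =====
-- def _extract_chord_positions(chord_line: str) -> list[tuple[int, str]]: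
--     """Extract (position, chord_name) pairs from a chord line."""
--     positions = []
--     pos = 0
--     for tok in chord_line.split(" "):
--         if tok:
--             positions.append((pos, tok))
--         pos += len(tok) + 1
--     return positions
-- ===== Notes on version B (the rewrite author's own statement) =====
-- stated objective: simpler
-- what changed: Replaces the hand-written two-pointer index scan with slicing by a single str.split call on the space separator plus a running offset (pos += len(tok)+1) that recovers each token's start position arithmetically.
import Mathlib
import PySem

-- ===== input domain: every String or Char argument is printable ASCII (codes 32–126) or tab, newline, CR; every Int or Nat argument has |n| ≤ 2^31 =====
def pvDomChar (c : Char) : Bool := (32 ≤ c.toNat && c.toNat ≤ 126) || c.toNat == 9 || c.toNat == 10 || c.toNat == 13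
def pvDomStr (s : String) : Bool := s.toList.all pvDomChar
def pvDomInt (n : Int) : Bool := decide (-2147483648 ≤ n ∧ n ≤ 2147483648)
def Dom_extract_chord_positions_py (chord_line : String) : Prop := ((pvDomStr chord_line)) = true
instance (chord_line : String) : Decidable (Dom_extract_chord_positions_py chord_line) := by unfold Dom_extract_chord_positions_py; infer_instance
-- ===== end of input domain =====

-- B replaces A's hand-written two-pointer scan by str.split(" ") plus a running offset (same O(n) cost, simpler).


-- ===== PORT A =====
-- inner while loop of A: scan the run of non-space chars (the token chord_line[i:j]) and the rest
def runA (cs : List Char) : List Char × List Char :=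
  match cs with
  | [] => ([], [])
  | c :: rest =>
    if c = ' ' then ([], c :: rest)
    else
      let p := runA rest
      (c :: p.1, p.2)

theorem runA_eq (cs : List Char) :
    runA cs = (cs.takeWhile (fun c => c != ' '), cs.dropWhile (fun c => c != ' ')) := by
  induction cs with
  | nil => simp [runA]
  | cons c rest ih =>
    by_cases h : c = ' ' <;> simp [runA, h, ih]

-- outer while loop of A, carrying the current index i
def loopA (cs : List Char) (i : Int) : List (Int × String) :=
  match cs with
  | [] => []
  | c :: rest =>
    if c = ' ' then loopA rest (i + 1)
    else
      let p := runA (c :: rest)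
      (i, String.ofList p.1) :: loopA p.2 (i + p.1.length)
termination_by cs.length
decreasing_by
  · simp
  · simp only [runA_eq]
    have := List.length_dropWhile_le (p := fun c => c != ' ') rest
    simp_all

def extract_chord_positions_py (chord_line : String) : List (Int × String) :=
  loopA chord_line.toList 0

-- ===== PORT B =====
def extract_chord_positions_py_alt (chord_line : String) : List (Int × String) :=
  let toks := PySem.Chars.splitOn chord_line.toList (" ".toList)
  (toks.foldl
    (fun (st : List (Int × String) × Int) t =>
      ((if t = [] then st.1 else st.1 ++ [(st.2, String.ofList t)]), st.2 + (t.length : Int) + 1))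
    ([], 0)).1

-- ===== PRECONDITION & SPEC =====
def Spec_extract_chord_positions_py (chord_line : String) (out : List (Int × String)) : Prop := out = extract_chord_positions_py_alt chord_line
instance (chord_line : String) (out : List (Int × String)) : Decidable (Spec_extract_chord_positions_py chord_line out) := by unfold Spec_extract_chord_positions_py; infer_instance

-- ===== CLAIM (what is proved, stated in full; the proofs are below) =====
def Claim_equal_extract_chord_positions_py : Prop := ∀ (chord_line : String), Dom_extract_chord_positions_py chord_line → Spec_extract_chord_positions_py chord_line (extract_chord_positions_py chord_line)

-- ===== LEMMAS AND PROOFS =====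

-- natural recursion computing the pieces of a split on a single space
def split1 (cs : List Char) : List (List Char) :=
  match cs with
  | [] => [[]]
  | c :: rest => if c = ' ' then [] :: split1 rest else (split1 rest).modifyHead (c :: ·)

theorem split1_ne_nil (cs : List Char) : split1 cs ≠ [] := by
  induction cs with
  | nil => simp [split1]
  | cons c rest ih =>
    by_cases h : c = ' ' <;> simp [split1, h]
    cases hs : split1 rest with
    | nil => exact absurd hs ih
    | cons x xs => simp

theorem splitOn_go_spec (sep : List Char) (hsep : sep = [' ']) (cs : List Char) :
    ∀ (fuel : Nat) (cur : List Char) (acc : List (List Char)), cs.length < fuel →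
      PySem.Chars.splitOn.go sep fuel cs cur acc
        = acc.reverse ++ ((cur.reverse ++ (split1 cs).headI) :: (split1 cs).tail) := by
  subst hsep
  induction cs with
  | nil =>
    intro fuel cur acc h
    match fuel with
    | f + 1 => simp [PySem.Chars.splitOn.go, split1]
  | cons c rest ih =>
    intro fuel cur acc h
    match fuel with
    | f + 1 =>
      have hf : rest.length < f := by simp at h; omega
      by_cases hc : c = ' '
      · subst hc
        have hpre : List.isPrefixOf [' '] (' ' :: rest) = true := by simp [List.isPrefixOf]
        rw [PySem.Chars.splitOn.go]
        simp only [hpre, if_pos, List.length_cons, List.length_nil, List.drop_succ_cons,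
          List.drop_zero]
        rw [ih f [] (cur.reverse :: acc) hf]
        cases hs : split1 rest with
        | nil => exact absurd hs (split1_ne_nil rest)
        | cons x xs => simp [split1, hs]
      · have hpre : List.isPrefixOf [' '] (c :: rest) = false := by
          simp [List.isPrefixOf]; exact fun h' => hc h'.symm
        rw [PySem.Chars.splitOn.go]
        simp only [hpre, Bool.false_eq_true, if_false]
        rw [ih f (c :: cur) acc hf]
        cases hs : split1 rest with
        | nil => exact absurd hs (split1_ne_nil rest)
        | cons x xs => simp [split1, hc, hs]

theorem splitOn_eq_split1 (cs : List Char) : PySem.Chars.splitOn cs [' '] = split1 cs := by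
  show PySem.Chars.splitOn.go [' '] (cs.length + 1) cs [] [] = split1 cs
  rw [splitOn_go_spec [' '] rfl cs (cs.length + 1) [] [] (by omega)]
  cases hs : split1 cs with
  | nil => exact absurd hs (split1_ne_nil cs)
  | cons x xs => simp

-- the emitted output of B's fold, as a recursion
def outR (ts : List (List Char)) (pos : Int) : List (Int × String) :=
  match ts with
  | [] => []
  | t :: ts' => (if t = [] then [] else [(pos, String.ofList t)]) ++ outR ts' (pos + t.length + 1)

theorem foldl_outR (ts : List (List Char)) :
    ∀ (acc : List (Int × String)) (pos : Int),
      (ts.foldl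
        (fun (st : List (Int × String) × Int) t =>
          ((if t = [] then st.1 else st.1 ++ [(st.2, String.ofList t)]), st.2 + (t.length : Int) + 1))
        (acc, pos)).1 = acc ++ outR ts pos := by
  induction ts with
  | nil => intro acc pos; simp [outR]
  | cons t ts' ih =>
    intro acc pos
    rw [List.foldl_cons]
    by_cases h : t = [] <;> simp only [h, if_pos, ite_false] <;>
      rw [ih] <;> simp [outR, h]

theorem split1_run (t : List Char) (r : List Char) (ht : ∀ c ∈ t, c ≠ ' ') :
    split1 (t ++ r) = (split1 r).modifyHead (t ++ ·) := by
  induction t with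
  | nil =>
    cases hs : split1 r with
    | nil => exact absurd hs (split1_ne_nil r)
    | cons x xs => simp [hs]
  | cons c t' ih =>
    have hc : c ≠ ' ' := ht c (by simp)
    have ih' := ih (fun d hd => ht d (by simp [hd]))
    simp only [List.cons_append, split1, hc, ih']
    cases hs : split1 r with
    | nil => exact absurd hs (split1_ne_nil r)
    | cons x xs => simp

theorem loopA_eq_outR (cs : List Char) (i : Int) : loopA cs i = outR (split1 cs) i := by
  induction cs, i using loopA.induct with
  | case1 i => simp [loopA, split1, outR]
  | case2 i rest ih =>
    rw [loopA]
    simp only [if_pos]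
    rw [ih]
    simp [split1, outR]
  | case3 i c rest hc p ih =>
    rw [loopA]
    simp only [hc, ite_false]
    rw [ih]
    have hp : p = runA (c :: rest) := rfl
    have hp1 : p.1 = (c :: rest).takeWhile (fun d => d != ' ') := by rw [hp, runA_eq]
    have hp2 : p.2 = (c :: rest).dropWhile (fun d => d != ' ') := by rw [hp, runA_eq]
    have hsplit : c :: rest = p.1 ++ p.2 := by
      rw [hp1, hp2, List.takeWhile_append_dropWhile]
    have ht : ∀ d ∈ p.1, d ≠ ' ' := by
      intro d hd
      rw [hp1] at hd
      have := List.mem_takeWhile_imp hd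
      simpa using this
    have hne : p.1 ≠ [] := by
      rw [hp1]; simp [hc]
    have hr : p.2 = [] ∨ ∃ r2, p.2 = ' ' :: r2 := by
      rw [hp2]
      cases hd : (c :: rest).dropWhile (fun d => d != ' ') with
      | nil => exact Or.inl rfl
      | cons x xs =>
        right
        have hh := List.head?_dropWhile_not (p := fun d => d != ' ') (c :: rest)
        rw [hd] at hh
        simp at hh
        exact ⟨xs, by rw [hh]⟩
    rw [← hp]
    conv_rhs => rw [hsplit]
    rw [split1_run p.1 p.2 ht]
    rcases hr with hr | ⟨r2, hr⟩
    · rw [hr]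
      simp [split1, outR, hne]
    · rw [hr]
      simp only [split1, List.modifyHead_cons, ite_true]
      simp [outR, hne]

-- ===== VERDICT (by name: the statement is the Claim_ definition above) =====
theorem extract_chord_positions_py_spec : Claim_equal_extract_chord_positions_py := by
  intro s _
  show extract_chord_positions_py s = extract_chord_positions_py_alt s
  unfold extract_chord_positions_py extract_chord_positions_py_alt
  have hsep : (" ".toList) = [' '] := rfl
  rw [hsep, splitOn_eq_split1, foldl_outR, loopA_eq_outR]
  simp
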